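-- pv_equiv track=rewrite | github.com/8125345/deepiano_data | deepiano_public/zl_newest_createdataset_publicSet/.ipynb_checkpoints/zl_mix_bgm_mid_to_npy_0718-checkpoint.py | space_to_string
-- ===== SOURCE A (Python) =====
-- def space_to_string(input_str):
--     s_dict = []
--     s_dict = list(input_str)
--     for i, s_char in enumerate(s_dict):
--       if s_char == ' ':
--         s_dict.pop(i)
--         s_dict.insert(i, '\ ')
--     s_str = [str(j) for j in s_dict]
--     output_str = ''.join(s_str)
--     return output_str
-- ===== SOURCE B (Python) =====
-- def space_to_string(input_str):
--     return '\\ '.join(input_str.split(' '))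
-- ===== Notes on version B (the rewrite author's own statement) =====
-- stated objective: faster
-- what changed: Replaces the per-character pop/insert mutation loop with a tokenize-and-rejoin: split the string on spaces and join the parts with the backslash-space escape.
import Mathlib
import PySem

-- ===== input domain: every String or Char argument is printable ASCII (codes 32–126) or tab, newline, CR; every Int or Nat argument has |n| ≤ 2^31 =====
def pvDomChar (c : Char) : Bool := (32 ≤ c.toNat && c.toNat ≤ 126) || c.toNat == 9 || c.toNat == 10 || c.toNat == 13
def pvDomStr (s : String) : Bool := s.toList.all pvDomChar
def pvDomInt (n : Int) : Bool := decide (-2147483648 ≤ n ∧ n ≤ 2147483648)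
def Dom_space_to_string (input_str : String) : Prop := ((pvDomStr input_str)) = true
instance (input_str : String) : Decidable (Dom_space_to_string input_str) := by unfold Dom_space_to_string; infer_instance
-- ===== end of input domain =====

-- B replaces A's per-character pop/insert mutation loop by an idiomatic split-on-space / join-with-"\ " rejoin.

-- ===== PORT A =====
-- loop body: `if s_char == ' ': s_dict.pop(i); s_dict.insert(i, '\ ')`
def pyStepA (acc : List String) (p : Int × String) : List String :=
  if p.2 = " " then
    PySem.List.insert (((PySem.List.pop? acc p.1).map (fun r => r.2)).getD acc) p.1 "\\ "
  else acc

def space_to_string (input_str : String) : String :=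
  let s_dict : List String := input_str.toList.map (fun c => String.singleton c)
  let s_dict := (PySem.List.enumerate s_dict).foldl pyStepA s_dict
  let s_str := s_dict.map (fun j => j)   -- str(j) on a str is the identity
  PySem.Str.join "" s_str

-- ===== PORT B =====
-- Source B: return '\ '.join(input_str.split(' ')) — split with the non-empty literal separator ' '
-- is PySem.Chars.splitOn (the sep ≠ "" form of str.split), join is PySem.Chars.join.
def space_to_string_alt (input_str : String) : String :=
  String.ofList (PySem.Chars.join "\\ ".toList (PySem.Chars.splitOn input_str.toList " ".toList))

-- ===== PRECONDITION & SPEC =====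
def Spec_space_to_string (input_str : String) (out : String) : Prop := out = space_to_string_alt input_str
instance (input_str : String) (out : String) : Decidable (Spec_space_to_string input_str out) := by unfold Spec_space_to_string; infer_instance

-- ===== CLAIM (what is proved, stated in full; the proofs are below) =====
def Claim_equal_space_to_string : Prop := ∀ (input_str : String), Dom_space_to_string input_str → Spec_space_to_string input_str (space_to_string input_str)

-- ===== LEMMAS AND PROOFS =====

-- the two-character escape produced for a space
def fc (c : Char) : List Char := if c = ' ' then ['\\', ' '] else [c]

-- A's loop: replacing element i by pop(i)+insert(i,·) over enumerate is a map
lemma eraseIdx_append_cons {α : Type} (pre : List α) (s : α) (suf : List α) :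
    (pre ++ s :: suf).eraseIdx pre.length = pre ++ suf := by
  induction pre with
  | nil => rfl
  | cons x xs ih => simpa using ih

lemma loopA (suf pre : List String) :
    (PySem.List.enumerate suf (pre.length : Int)).foldl pyStepA (pre ++ suf)
      = pre ++ suf.map (fun s => if s = " " then "\\ " else s) := by
  induction suf generalizing pre with
  | nil => simp [PySem.List.enumerate_nil]
  | cons s suf ih =>
    rw [PySem.List.enumerate_cons, List.foldl_cons]
    have hlen : pre.length < (pre ++ s :: suf).length := by simp
    have hstep : pyStepA (pre ++ s :: suf) ((pre.length : Int), s)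
        = (pre ++ [if s = " " then "\\ " else s]) ++ suf := by
      unfold pyStepA
      by_cases hs : s = " "
      · subst hs
        rw [if_pos rfl]
        rw [PySem.List.pop?_natCast _ _ hlen]
        simp only [Option.map_some, Option.getD_some,
          eraseIdx_append_cons]
        rw [PySem.List.insert_natCast _ _ _ (by simp)]
        simp
      · simp [hs]
    rw [hstep]
    have : ((pre.length : Int) + 1) = (((pre ++ [if s = " " then "\\ " else s]).length : Nat) : Int) := by
      simp
    rw [this, ih]
    simp

-- join with empty separator is flatten
lemma join_nil_flatten : ∀ xss : List (List Char), PySem.Chars.join [] xss = xss.flatten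
  | [] => PySem.Chars.join_nil []
  | [p] => by simpa using PySem.Chars.join_singleton [] p
  | p :: q :: rest => by
    rw [PySem.Chars.join_cons_cons, join_nil_flatten (q :: rest)]
    simp

-- specification of str.split(' ')
def sp : List Char → List (List Char)
  | [] => [[]]
  | c :: t => if c = ' ' then [] :: sp t else (c :: (sp t).headD []) :: (sp t).tail

lemma sp_ne_nil (l : List Char) : sp l ≠ [] := by
  cases l with
  | nil => simp [sp]
  | cons c t => by_cases h : c = ' ' <;> simp [sp, h]

lemma go_eq : ∀ (fuel : Nat) (l cur : List Char) (acc : List (List Char)) (_ : l.length < fuel),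
    PySem.Chars.splitOn.go [' '] fuel l cur acc
      = acc.reverse ++ (sp l).modifyHead (cur.reverse ++ ·)
  | 0, l, cur, acc, h => by omega
  | fuel + 1, [], cur, acc, _ => by
    rw [PySem.Chars.splitOn.go.eq_def]
    simp [sp]
  | fuel + 1, c :: rest, cur, acc, h => by
    rw [PySem.Chars.splitOn.go.eq_def]
    show (if [' '].isPrefixOf (c :: rest) = true then
            PySem.Chars.splitOn.go [' '] fuel (List.drop [' '].length (c :: rest)) [] (cur.reverse :: acc)
          else PySem.Chars.splitOn.go [' '] fuel rest (c :: cur) acc)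
        = acc.reverse ++ List.modifyHead (fun x => cur.reverse ++ x) (sp (c :: rest))
    by_cases hc : c = ' '
    · have hp : [' '].isPrefixOf (c :: rest) = true := by simp [List.isPrefixOf, hc]
      rw [if_pos hp]
      rw [go_eq fuel _ [] (cur.reverse :: acc) (by simpa using Nat.lt_of_succ_lt_succ h)]
      obtain ⟨h0, t0, ht⟩ : ∃ h0 t0, sp rest = h0 :: t0 := by
        cases hsp : sp rest with
        | nil => exact absurd hsp (sp_ne_nil rest)
        | cons a b => exact ⟨a, b, rfl⟩
      simp [sp, hc, ht]
    · have hp : [' '].isPrefixOf (c :: rest) = false := by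
        simp [List.isPrefixOf]; exact fun h => absurd h.symm hc
      rw [if_neg (by simp [hp])]
      rw [go_eq fuel rest (c :: cur) acc (by simpa using Nat.lt_of_succ_lt_succ h)]
      obtain ⟨h0, t0, ht⟩ : ∃ h0 t0, sp rest = h0 :: t0 := by
        cases hsp : sp rest with
        | nil => exact absurd hsp (sp_ne_nil rest)
        | cons a b => exact ⟨a, b, rfl⟩
      simp [sp, hc, ht]

lemma splitOn_space (l : List Char) : PySem.Chars.splitOn l [' '] = sp l := by
  unfold PySem.Chars.splitOn
  rw [go_eq (l.length + 1) l [] [] (by omega)]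
  cases hsp : sp l with
  | nil => exact absurd hsp (sp_ne_nil l)
  | cons a b => simp

lemma join_cons_head (sep : List Char) (c : Char) (h : List Char) (t : List (List Char)) :
    PySem.Chars.join sep ((c :: h) :: t) = c :: PySem.Chars.join sep (h :: t) := by
  cases t with
  | nil => simp [PySem.Chars.join_singleton]
  | cons q rest => simp [PySem.Chars.join_cons_cons]

lemma join_sp : ∀ l : List Char, PySem.Chars.join ['\\', ' '] (sp l) = l.flatMap fc
  | [] => by simpa [sp, fc] using PySem.Chars.join_singleton ['\\', ' '] []
  | c :: t => by
    obtain ⟨h0, t0, ht⟩ : ∃ h0 t0, sp t = h0 :: t0 := by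
      cases hsp : sp t with
      | nil => exact absurd hsp (sp_ne_nil t)
      | cons a b => exact ⟨a, b, rfl⟩
    have ihj : PySem.Chars.join ['\\', ' '] (sp t) = t.flatMap fc := join_sp t
    by_cases hc : c = ' '
    · rw [show sp (c :: t) = [] :: sp t by simp [sp, hc], ht,
        PySem.Chars.join_cons_cons, ← ht, ihj]
      simp [fc, hc]
    · rw [show sp (c :: t) = (c :: h0) :: t0 by simp [sp, hc, ht],
        join_cons_head, ← ht, ihj]
      simp [fc, hc]

lemma toList_g_singleton (c : Char) :
    (if String.singleton c = " " then "\\ " else String.singleton c).toList = fc c := by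
  by_cases hc : c = ' '
  · subst hc
    rw [if_pos (by decide)]
    decide
  · have : String.singleton c ≠ " " := by
      intro h
      have := congrArg String.toList h
      simp at this
      exact hc this
    simp [this, fc, hc]

-- ===== VERDICT (by name: the statement is the Claim_ definition above) =====
theorem space_to_string_spec : Claim_equal_space_to_string := by
  intro s _
  simp only [Spec_space_to_string, space_to_string, space_to_string_alt]
  rw [← String.toList_inj]
  have hA := loopA (s.toList.map (fun c => String.singleton c)) []
  simp only [List.length_nil, Nat.cast_zero, List.nil_append] at hA
  rw [hA]
  rw [PySem.Str.toList_join]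
  rw [show (" ".toList : List Char) = [' '] from rfl,
      show ("\\ ".toList : List Char) = ['\\', ' '] from rfl]
  rw [splitOn_space, join_sp]
  rw [show ("".toList : List Char) = [] from rfl, join_nil_flatten]
  simp only [List.map_map]
  rw [String.toList_ofList]
  simp only [List.flatMap_def, ← List.map_map]
  congr 1
  simp only [List.map_map]
  exact List.map_congr_left (fun c _ => toList_g_singleton c)
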